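-- pv_equiv track=rewrite | github.com/CASY82/CHH_StudyRoom | Algo/Basic_Programmers/Programmers_1.py | solution
-- ===== SOURCE A (Python) =====
-- def solution(num_list):
--     odd = 0
--     even = 0
--
--     for i in range(1, len(num_list) + 1):
--         if i % 2 == 0:
--             even += num_list[i - 1]
--         else:
--             odd += num_list[i - 1]
--
--     return max(even, odd)
-- ===== SOURCE B (Python) =====
-- def solution(num_list):
--     # Pairwise iteration: consume two elements per step (odd position, then even),
--     # no index arithmetic and no modulo test.
--     it = iter(num_list)
--     odd = 0
--     even = 0
--     for x in it:
--         odd += x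
--         even += next(it, 0)
--     return max(even, odd)
-- ===== Notes on version B (the rewrite author's own statement) =====
-- stated objective: alternative
-- what changed: Replaces A's index loop over range(1, len+1) with a parity test and i-1 lookups by a pairwise iterator pass that consumes two elements per step, so no indices or modulo are computed.
import Mathlib
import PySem

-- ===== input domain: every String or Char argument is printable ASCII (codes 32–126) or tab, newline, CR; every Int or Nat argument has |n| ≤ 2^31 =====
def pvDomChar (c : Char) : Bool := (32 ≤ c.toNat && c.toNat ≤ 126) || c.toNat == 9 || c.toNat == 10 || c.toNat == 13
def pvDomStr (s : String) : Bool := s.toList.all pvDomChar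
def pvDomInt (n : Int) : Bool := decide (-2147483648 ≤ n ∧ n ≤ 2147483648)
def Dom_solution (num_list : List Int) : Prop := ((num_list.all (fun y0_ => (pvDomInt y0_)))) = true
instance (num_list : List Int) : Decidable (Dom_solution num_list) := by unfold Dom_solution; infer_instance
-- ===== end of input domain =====

-- B replaces A's 1-based index loop with a pairwise two-at-a-time pass (objective: alternative).

-- ===== PORT A =====
-- state s = (odd, even); 'num_list[i-1]' is always in range, ported as pyGetD with default 0
def solution (num_list : List Int) : Int :=
  let r := (PySem.List.pyRange 1 ((num_list.length : Int) + 1) 1).foldl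
    (fun s i =>
      if PySem.Int.mod i 2 = 0 then (s.1, s.2 + PySem.List.pyGetD num_list (i - 1) 0)
      else (s.1 + PySem.List.pyGetD num_list (i - 1) 0, s.2))
    ((0 : Int), (0 : Int))
  max r.2 r.1

-- ===== PORT B =====
-- B's for-loop over the iterator, consuming two elements per step; 'next(it, 0)' on an
-- exhausted iterator contributes 0, i.e. the one-element case adds only to odd.
def pairSums : List Int → Int × Int → Int × Int
  | [], s => s
  | [x], (o, e) => (o + x, e)
  | x :: y :: rest, (o, e) => pairSums rest (o + x, e + y)

def solution_alt (num_list : List Int) : Int :=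
  let r := pairSums num_list (0, 0)
  max r.2 r.1

-- ===== PRECONDITION & SPEC =====
def Spec_solution (num_list : List Int) (out : Int) : Prop := out = solution_alt num_list
instance (num_list : List Int) (out : Int) : Decidable (Spec_solution num_list out) := by unfold Spec_solution; infer_instance

-- ===== CLAIM (what is proved, stated in full; the proofs are below) =====
def Claim_equal_solution : Prop := ∀ (num_list : List Int), Dom_solution num_list → Spec_solution num_list (solution num_list)

-- ===== LEMMAS AND PROOFS =====

-- proof-side loop body of A, phrased on (index, value) pairs ('i' of A is p.1 + 1)
def gA (s : Int × Int) (p : Int × Int) : Int × Int :=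
  if PySem.Int.mod (p.1 + 1) 2 = 0 then (s.1, s.2 + p.2) else (s.1 + p.2, s.2)

theorem enum_key : ∀ (xs : List Int) (a o e : Int), PySem.Int.mod a 2 = 0 →
    (PySem.List.enumerate xs a).foldl gA (o, e) = pairSums xs (o, e)
  | [], a, o, e, _ => by simp [PySem.List.enumerate_nil, pairSums]
  | [x], a, o, e, hm => by
    rw [PySem.Int.mod_eq_emod_of_pos (by omega)] at hm
    have h1 : PySem.Int.mod (a + 1) 2 ≠ 0 := by
      rw [PySem.Int.mod_eq_emod_of_pos (by omega)]; omega
    simp only [PySem.List.enumerate_cons, PySem.List.enumerate_nil, List.foldl_cons,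
      List.foldl_nil, pairSums, gA]
    rw [if_neg h1]
  | x :: y :: rest, a, o, e, hm => by
    rw [PySem.Int.mod_eq_emod_of_pos (by omega)] at hm
    have h1 : PySem.Int.mod (a + 1) 2 ≠ 0 := by
      rw [PySem.Int.mod_eq_emod_of_pos (by omega)]; omega
    have h2 : PySem.Int.mod (a + 1 + 1) 2 = 0 := by
      rw [PySem.Int.mod_eq_emod_of_pos (by omega)]; omega
    have ih := enum_key rest (a + 1 + 1) (o + x) (e + y)
      (by rw [PySem.Int.mod_eq_emod_of_pos (by omega)]; omega)
    simp only [PySem.List.enumerate_cons, List.foldl_cons, pairSums]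
    simp only [gA]
    rw [if_neg h1, if_pos h2]
    exact ih

theorem bridge (xs : List Int) :
    (PySem.List.pyRange 1 ((xs.length : Int) + 1) 1).foldl
      (fun s i =>
        if PySem.Int.mod i 2 = 0 then (s.1, s.2 + PySem.List.pyGetD xs (i - 1) 0)
        else (s.1 + PySem.List.pyGetD xs (i - 1) 0, s.2))
      ((0 : Int), (0 : Int))
    = (PySem.List.enumerate xs 0).foldl gA (0, 0) := by
  rw [PySem.List.enumerate_eq_map_pyRange (xs := xs) (d := 0), PySem.List.pyRange_one 1 ((xs.length : Int) + 1),
    PySem.List.pyRange_one 0 (PySem.List.len xs), List.foldl_map, List.foldl_map, List.foldl_map]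
  have hlen : ((xs.length : Int) + 1 - 1).toNat = xs.length := by omega
  have hlen2 : ((PySem.List.len xs : Int) - 0).toNat = xs.length := by
    simp [PySem.List.len_eq]
  rw [hlen, hlen2]
  apply PySem.List.foldl_congr_mem
  intro s k _
  simp only [gA]
  have : (1 : Int) + (k : Int) - 1 = ((0 : Int) + (k : Int)) := by omega
  rw [this]
  have : (1 : Int) + (k : Int) = (0 : Int) + (k : Int) + 1 := by omega
  rw [this]

-- ===== VERDICT (by name: the statement is the Claim_ definition above) =====
theorem solution_spec : Claim_equal_solution := by
  intro xs _
  unfold Spec_solution solution solution_alt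
  rw [bridge xs, enum_key xs 0 0 0 (by decide)]
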